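-- pv_equiv track=rewrite | github.com/Daarrik/2410-ds-intro | Act4/diseases.py | generate_class_numbers
-- ===== SOURCE A (Python) =====
-- def generate_class_numbers(string_list):
--   class_dictionary = {}
--   class_count = 0
--   for string in string_list:
--     if string not in class_dictionary:
--       class_dictionary[string] = class_count
--       class_count += 1
--   return class_dictionary
-- ===== SOURCE B (Python) =====
-- def generate_class_numbers(string_list):
--   order = sorted(set(string_list), key=string_list.index)
--   return {s: i for i, s in enumerate(order)}
-- ===== Notes on version B (the rewrite author's own statement) =====
-- stated objective: alternative
-- what changed: Replaces A's single-pass membership-guarded accumulator with a counter by a sort-based pipeline: collect the distinct strings with set(), sort them by their first-occurrence position (list.index), then enumerate the sorted order.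
import Mathlib
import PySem

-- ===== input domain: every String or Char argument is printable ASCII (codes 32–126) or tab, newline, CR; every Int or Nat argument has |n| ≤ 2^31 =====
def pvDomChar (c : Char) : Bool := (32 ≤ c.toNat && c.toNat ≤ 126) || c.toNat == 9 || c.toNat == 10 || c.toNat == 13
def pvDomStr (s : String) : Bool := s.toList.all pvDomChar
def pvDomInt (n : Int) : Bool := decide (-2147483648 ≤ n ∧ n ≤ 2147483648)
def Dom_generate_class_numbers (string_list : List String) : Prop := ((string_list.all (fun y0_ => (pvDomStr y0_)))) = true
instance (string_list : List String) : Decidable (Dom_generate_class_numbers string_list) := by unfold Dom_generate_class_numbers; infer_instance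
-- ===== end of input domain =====

-- B replaces A's single-pass guarded accumulator by a sort-based pipeline: distinct strings sorted by first-occurrence index, then enumerated; same result (not faster).


-- ===== PORT A =====
-- for string in string_list: if string not in class_dictionary: insert with class_count; class_count += 1
def generate_class_numbers (string_list : List String) : List (String × Int) :=
  (string_list.foldl
    (fun (st : PySem.Dict String Int × Int) s =>
      if st.1.contains s = false then (st.1.insert s st.2, st.2 + 1) else st)
    (PySem.Dict.empty, 0)).1.items

-- ===== PORT B =====
-- key=string_list.index: every element of set(string_list) occurs in string_list, so .index
-- always succeeds; index? is some there and the `.getD 0` default is never used.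
def pvKey (string_list : List String) (s : String) : Nat :=
  (PySem.List.index? string_list s).getD 0

-- order = sorted(set(string_list), key=string_list.index); return {s: i for i, s in enumerate(order)}
-- (sorted by a key injective on the set, so Python's set iteration order cannot affect the result)
def generate_class_numbers_alt (string_list : List String) : List (String × Int) :=
  let order := PySem.List.sorted (PySem.Set.ofList string_list) (pvKey string_list) false
  (PySem.List.enumerate order 0).map (fun p => (p.2, p.1))

-- ===== PRECONDITION & SPEC =====
def Spec_generate_class_numbers (string_list : List String) (out : List (String × Int)) : Prop := out = generate_class_numbers_alt string_list
instance (string_list : List String) (out : List (String × Int)) : Decidable (Spec_generate_class_numbers string_list out) := by unfold Spec_generate_class_numbers; infer_instance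

-- ===== CLAIM (what is proved, stated in full; the proofs are below) =====
def Claim_equal_generate_class_numbers : Prop := ∀ (string_list : List String), Dom_generate_class_numbers string_list → Spec_generate_class_numbers string_list (generate_class_numbers string_list)

-- ===== LEMMAS AND PROOFS =====

-- the fresh (first-occurrence, not-yet-seen) elements of xs relative to seen
def pvFresh (seen : List String) : List String → List String
  | [] => []
  | s :: rest => if s ∈ seen then pvFresh seen rest else s :: pvFresh (seen ++ [s]) rest

lemma pvUpdate_eq_append_fresh (xs : List String) : ∀ (seen : List String),
    PySem.Set.update seen xs = seen ++ pvFresh seen xs := by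
  induction xs with
  | nil => intro seen; simp [PySem.Set.update_nil, pvFresh]
  | cons s rest ih =>
    intro seen
    rw [PySem.Set.update_cons]
    by_cases h : s ∈ seen
    · rw [PySem.Set.add_of_mem h, ih]
      simp [pvFresh, h]
    · rw [PySem.Set.add_of_not_mem h, ih]
      simp [pvFresh, h]

lemma pvFresh_nil_eq_dedup (xs : List String) :
    pvFresh [] xs = PySem.List.dedup xs := by
  have h := pvUpdate_eq_append_fresh xs []
  rw [PySem.Set.update_nil_left, List.nil_append] at h
  rw [PySem.List.dedup_eq_ofList, ← h]

lemma pvFresh_congr (xs : List String) : ∀ (s1 s2 : List String),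
    (∀ a, a ∈ s1 ↔ a ∈ s2) → pvFresh s1 xs = pvFresh s2 xs := by
  induction xs with
  | nil => intro _ _ _; rfl
  | cons s rest ih =>
    intro s1 s2 hiff
    by_cases h : s ∈ s1
    · simp only [pvFresh, if_pos h, if_pos ((hiff s).1 h)]
      exact ih s1 s2 hiff
    · have h2 : s ∉ s2 := fun hm => h ((hiff s).2 hm)
      simp only [pvFresh, if_neg h, if_neg h2]
      refine congrArg _ (ih _ _ ?_)
      intro a; simp [hiff a]

lemma pvFresh_not_mem_seen (xs : List String) : ∀ (seen : List String) (a : String),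
    a ∈ pvFresh seen xs → a ∉ seen := by
  induction xs with
  | nil => intro _ _ h; simp [pvFresh] at h
  | cons s rest ih =>
    intro seen a ha
    by_cases h : s ∈ seen
    · rw [pvFresh, if_pos h] at ha; exact ih seen a ha
    · rw [pvFresh, if_neg h] at ha
      rcases List.mem_cons.1 ha with rfl | ha
      · exact h
      · have := ih (seen ++ [s]) a ha
        intro hm; exact this (List.mem_append_left _ hm)

lemma pvFresh_snoc (xs : List String) : ∀ (seen : List String) (x : String),
    pvFresh (seen ++ [x]) xs = (pvFresh seen xs).filter (fun s => s != x) := by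
  induction xs with
  | nil => intro _ _; rfl
  | cons s rest ih =>
    intro seen x
    by_cases h : s ∈ seen
    · rw [pvFresh, if_pos (List.mem_append_left _ h), pvFresh, if_pos h, ih]
    · by_cases hx : s = x
      · subst hx
        rw [pvFresh, if_pos (by simp), pvFresh, if_neg h]
        rw [List.filter_cons_of_neg (by simp)]
        rw [List.filter_eq_self.2 ?_]
        intro a ha
        have := pvFresh_not_mem_seen rest (seen ++ [s]) a ha
        simp only [List.mem_append, List.mem_singleton, not_or] at this
        simpa using this.2
      · rw [pvFresh, if_neg (by simp [h, hx]), pvFresh, if_neg h]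
        rw [List.filter_cons_of_pos (by simp [hx])]
        refine congrArg _ ?_
        rw [pvFresh_congr rest (seen ++ [x] ++ [s]) (seen ++ [s] ++ [x]) (by intro a; simp; tauto)]
        exact ih (seen ++ [s]) x

lemma pvDedup_cons (x : String) (t : List String) :
    PySem.List.dedup (x :: t) = x :: (PySem.List.dedup t).filter (fun s => s != x) := by
  rw [← pvFresh_nil_eq_dedup, ← pvFresh_nil_eq_dedup]
  rw [pvFresh, if_neg (List.not_mem_nil), List.nil_append]
  exact congrArg _ (pvFresh_snoc t [] x)

lemma pvKey_cons_self (x : String) (t : List String) : pvKey (x :: t) x = 0 := by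
  rw [pvKey, PySem.List.index?_cons_self]; rfl

lemma pvKey_cons_ne (x b : String) (t : List String) (hb : b ∈ t) (hne : b ≠ x) :
    pvKey (x :: t) b = pvKey t b + 1 := by
  rw [pvKey, pvKey, PySem.List.index?_cons_of_ne t (fun h => hne h.symm)]
  rcases (PySem.List.index?_isSome_iff t b).2 hb with h
  rcases Option.isSome_iff_exists.1 h with ⟨k, hk⟩
  rw [hk]; rfl

lemma pvPairwise_key_dedup (xs : List String) :
    (PySem.List.dedup xs).Pairwise (fun a b => pvKey xs a < pvKey xs b) := by
  induction xs with
  | nil => simp [PySem.List.dedup]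
  | cons x t ih =>
    rw [pvDedup_cons]
    refine List.Pairwise.cons ?_ ?_
    · intro b hb
      rw [List.mem_filter] at hb
      have hbt : b ∈ t := (PySem.List.mem_dedup t b).1 hb.1
      have hbx : b ≠ x := by simpa using hb.2
      rw [pvKey_cons_self, pvKey_cons_ne x b t hbt hbx]
      omega
    · refine (List.Pairwise.filter _ ih).imp_of_mem ?_
      intro a b ha hb hlt
      rw [List.mem_filter] at ha hb
      have hat : a ∈ t := (PySem.List.mem_dedup t a).1 ha.1
      have hbt : b ∈ t := (PySem.List.mem_dedup t b).1 hb.1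
      rw [pvKey_cons_ne x a t hat (by simpa using ha.2),
          pvKey_cons_ne x b t hbt (by simpa using hb.2)]
      omega

lemma pvSorted_eq_dedup (xs : List String) :
    PySem.List.sorted (PySem.Set.ofList xs) (pvKey xs) false = PySem.List.dedup xs := by
  refine PySem.List.sorted_eq_of_perm_of_pairwise_lt _ _ _ ?_ (pvPairwise_key_dedup xs)
  rw [PySem.List.dedup_eq_ofList]

lemma pvLoop_items (xs : List String) : ∀ (d : PySem.Dict String Int),
    d.keys.Nodup →
    (xs.foldl
      (fun (st : PySem.Dict String Int × Int) s =>
        if st.1.contains s = false then (st.1.insert s st.2, st.2 + 1) else st)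
      (d, (d.size : Int))).1.items
      = d.items ++ (PySem.List.enumerate (pvFresh d.keys xs) (d.size : Int)).map (fun p => (p.2, p.1)) := by
  induction xs with
  | nil => intro d _; simp [pvFresh, PySem.List.enumerate_nil]
  | cons s rest ih =>
    intro d hnd
    simp only [List.foldl_cons]
    by_cases h : d.contains s = true
    · have hmem : s ∈ d.keys := (PySem.Dict.contains_iff_mem_keys d s).1 h
      simp only [h, Bool.true_eq_false, if_false]
      rw [ih d hnd]
      simp [pvFresh, hmem]
    · have h' : d.contains s = false := by simpa using h
      have hnmem : s ∈ d.keys → False := fun hm => by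
        exact h ((PySem.Dict.contains_iff_mem_keys d s).2 hm)
      simp only [h', if_true]
      have hkeys : (d.insert s (d.size : Int)).keys = d.keys ++ [s] :=
        PySem.Dict.keys_insert_of_not_contains (v := (d.size : Int)) (h := h')
      have hnd' : (d.insert s (d.size : Int)).keys.Nodup := by
        rw [hkeys]; simp [List.nodup_append, hnd]; intro a ha hae; exact hnmem (hae ▸ ha)
      have hsize : ((d.insert s (d.size : Int)).size : Int) = (d.size : Int) + 1 := by
        have := PySem.Dict.size_insert d s (d.size : Int)
        rw [this, h']; push_cast; ring
      have := ih (d.insert s (d.size : Int)) hnd'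
      rw [hsize] at this
      rw [this]
      rw [PySem.Dict.items_insert_of_not_contains (v := (d.size : Int)) (h := h'), hkeys]
      rw [show pvFresh d.keys (s :: rest) = s :: pvFresh (d.keys ++ [s]) rest from by
        simp only [pvFresh]; rw [if_neg hnmem], PySem.List.enumerate_cons]
      simp

-- ===== VERDICT (by name: the statement is the Claim_ definition above) =====
theorem generate_class_numbers_spec : Claim_equal_generate_class_numbers := by
  intro xs _
  unfold Spec_generate_class_numbers generate_class_numbers generate_class_numbers_alt
  rw [pvSorted_eq_dedup]
  have h := pvLoop_items xs PySem.Dict.empty (by simp [PySem.Dict.keys_empty])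
  simp only [PySem.Dict.size_empty, Int.natCast_zero] at h
  rw [h]
  have he : PySem.Dict.empty.items = ([] : List (String × Int)) := rfl
  have hk : (PySem.Dict.empty : PySem.Dict String Int).keys = [] := rfl
  simp [he, hk, pvFresh_nil_eq_dedup]
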